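-- pv_equiv track=rewrite | github.com/ruangwithv-cell/crypto-algo | crypto_algo/backtest_compare.py | _whipsaw_counts
-- ===== SOURCE A (Python) =====
-- from collections import defaultdict
--
-- def _whipsaw_counts(events: list[tuple[int, str, str]], window: int) -> dict[str, int]:
--     # events: (run_idx, symbol, side) where side is ENTRY or EXIT
--     quick_entry_exit = 0
--     quick_exit_reentry = 0
--
--     by_symbol: dict[str, list[tuple[int, str]]] = defaultdict(list)
--     for idx, sym, side in events:
--         by_symbol[sym].append((idx, side))
--
--     for seq in by_symbol.values():
--         seq.sort(key=lambda x: x[0])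
--         for i in range(1, len(seq)):
--             prev_idx, prev_side = seq[i - 1]
--             idx, side = seq[i]
--             if idx - prev_idx > window:
--                 continue
--             if prev_side == "ENTRY" and side == "EXIT":
--                 quick_entry_exit += 1
--             elif prev_side == "EXIT" and side == "ENTRY":
--                 quick_exit_reentry += 1
--
--     return {
--         "quick_entry_exit": quick_entry_exit,
--         "quick_exit_reentry": quick_exit_reentry,
--         "total_whipsaw": quick_entry_exit + quick_exit_reentry,
--     }
-- ===== SOURCE B (Python) =====
-- def _whipsaw_counts(events: list[tuple[int, str, str]], window: int) -> dict[str, int]: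
--     # One global stable sort by (symbol, run_idx), then a single flat pass that
--     # compares each event with the previous one only when the symbol is unchanged.
--     quick_entry_exit = 0
--     quick_exit_reentry = 0
--     prev = None  # (sym, idx, side) of the previous event in the sorted order
--     for idx, sym, side in sorted(events, key=lambda e: (e[1], e[0])):
--         if prev is not None and prev[0] == sym:
--             if idx - prev[1] <= window:
--                 if prev[2] == "ENTRY" and side == "EXIT":
--                     quick_entry_exit += 1
--                 elif prev[2] == "EXIT" and side == "ENTRY":
--                     quick_exit_reentry += 1
--         prev = (sym, idx, side)
--     return {
--         "quick_entry_exit": quick_entry_exit,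
--         "quick_exit_reentry": quick_exit_reentry,
--         "total_whipsaw": quick_entry_exit + quick_exit_reentry,
--     }
-- ===== Notes on version B (the rewrite author's own statement) =====
-- stated objective: alternative
-- what changed: Replaces the defaultdict grouping plus per-symbol sort and nested index loop with one global stable sort by (symbol, run_idx) followed by a single flat pass that keeps only the previous event and skips the comparison at symbol boundaries.
import Mathlib
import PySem

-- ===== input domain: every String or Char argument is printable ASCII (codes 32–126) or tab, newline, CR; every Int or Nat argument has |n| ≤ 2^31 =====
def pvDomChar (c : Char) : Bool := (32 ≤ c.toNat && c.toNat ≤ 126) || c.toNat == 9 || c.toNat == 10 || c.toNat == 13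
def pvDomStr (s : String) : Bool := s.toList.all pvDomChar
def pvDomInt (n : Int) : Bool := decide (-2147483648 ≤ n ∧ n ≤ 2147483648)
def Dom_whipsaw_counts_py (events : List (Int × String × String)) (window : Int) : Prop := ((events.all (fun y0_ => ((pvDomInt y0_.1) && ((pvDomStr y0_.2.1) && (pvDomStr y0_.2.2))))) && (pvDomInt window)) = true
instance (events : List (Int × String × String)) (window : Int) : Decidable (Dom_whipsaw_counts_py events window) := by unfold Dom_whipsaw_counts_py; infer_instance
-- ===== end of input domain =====

-- B replaces A's per-symbol grouping + per-group sort + nested index loop by one global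
-- stable sort on (symbol, run_idx) and a single flat pass (objective: alternative; same cost).

-- ===== PORT A =====
def whipsaw_counts_py (events : List (Int × String × String)) (window : Int) : List (String × Int) :=
  let by_symbol : PySem.Dict String (List (Int × String)) :=
    events.foldl (fun d e => d.modify e.2.1 [] (fun l => l ++ [(e.1, e.2.2)])) PySem.Dict.empty
  let q : Int × Int :=
    by_symbol.values.foldl (fun q seq0 =>
      let seq := PySem.List.sorted seq0 (fun x => x.1)
      (PySem.List.pyRange 1 (PySem.List.len seq) 1).foldl (fun q i =>
        let prev := PySem.List.pyGetD seq (i - 1) (0, "")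
        let cur := PySem.List.pyGetD seq i (0, "")
        if cur.1 - prev.1 > window then q
        else if prev.2 == "ENTRY" && cur.2 == "EXIT" then (q.1 + 1, q.2)
        else if prev.2 == "EXIT" && cur.2 == "ENTRY" then (q.1, q.2 + 1)
        else q) q) (0, 0)
  [("quick_entry_exit", q.1), ("quick_exit_reentry", q.2), ("total_whipsaw", q.1 + q.2)]

-- ===== PORT B =====
def whipsaw_counts_py_alt (events : List (Int × String × String)) (window : Int) : List (String × Int) :=
  let st : Option (String × Int × String) × Int × Int :=
    (PySem.List.sorted2 events (fun e => e.2.1) (fun e => e.1)).foldl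
      (fun st e =>
        let q :=
          match st.1 with
          | some p =>
            if p.1 == e.2.1 then
              if e.1 - p.2.1 ≤ window then
                if p.2.2 == "ENTRY" && e.2.2 == "EXIT" then (st.2.1 + 1, st.2.2)
                else if p.2.2 == "EXIT" && e.2.2 == "ENTRY" then (st.2.1, st.2.2 + 1)
                else st.2
              else st.2
            else st.2
          | none => st.2
        (some (e.2.1, e.1, e.2.2), q))
      (none, 0, 0)
  [("quick_entry_exit", st.2.1), ("quick_exit_reentry", st.2.2), ("total_whipsaw", st.2.1 + st.2.2)]

-- ===== PRECONDITION & SPEC =====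
def Spec_whipsaw_counts_py (events : List (Int × String × String)) (window : Int) (out : List (String × Int)) : Prop := out = whipsaw_counts_py_alt events window
instance (events : List (Int × String × String)) (window : Int) (out : List (String × Int)) : Decidable (Spec_whipsaw_counts_py events window out) := by unfold Spec_whipsaw_counts_py; infer_instance

-- ===== CLAIM (what is proved, stated in full; the proofs are below) =====
def Claim_equal_whipsaw_counts_py : Prop := ∀ (events : List (Int × String × String)) (window : Int), Dom_whipsaw_counts_py events window → Spec_whipsaw_counts_py events window (whipsaw_counts_py events window)

-- ===== LEMMAS AND PROOFS =====

-- the pair-counting step shared by both programs (A's branch order, on (idx, side) pairs)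
def pvStepP (w : Int) (q : Int × Int) (a b : Int × String) : Int × Int :=
  if b.1 - a.1 > w then q
  else if a.2 == "ENTRY" && b.2 == "EXIT" then (q.1 + 1, q.2)
  else if a.2 == "EXIT" && b.2 == "ENTRY" then (q.1, q.2 + 1)
  else q

def pvProj (e : Int × String × String) : Int × String := (e.1, e.2.2)

-- adjacent-pair count over a sequence of (idx, side) pairs
def pvCntP (w : Int) (q : Int × Int) : List (Int × String) → Int × Int
  | a :: b :: t => pvCntP w (pvStepP w q a b) (b :: t)
  | _ => q

-- the same count over full event triples (symbol ignored)
def pvCnt3 (w : Int) (q : Int × Int) : List (Int × String × String) → Int × Int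
  | a :: b :: t => pvCnt3 w (pvStepP w q (pvProj a) (pvProj b)) (b :: t)
  | _ => q

def pvG (events : List (Int × String × String)) (s : String) : List (Int × String × String) :=
  events.filter (fun e => e.2.1 == s)

def pvKeysA (events : List (Int × String × String)) : List String :=
  PySem.Set.ofList (events.map (fun e => e.2.1))

def pvSK (events : List (Int × String × String)) : List String :=
  PySem.List.sorted (pvKeysA events) (fun s => s)

def pvBlocks (events : List (Int × String × String)) : List (Int × String × String) :=
  (pvSK events).flatMap (fun s => PySem.List.sorted (pvG events s) (fun e => e.1))

-- per-symbol contribution (identical for both programs)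
def pvC (events : List (Int × String × String)) (w : Int) (s : String) : Int × Int :=
  pvCnt3 w (0, 0) (PySem.List.sorted (pvG events s) (fun e => e.1))

-- A's inner index loop, named
def pvInner (w : Int) (q : Int × Int) (seq : List (Int × String)) : Int × Int :=
  (PySem.List.pyRange 1 (PySem.List.len seq) 1).foldl (fun q i =>
    let prev := PySem.List.pyGetD seq (i - 1) (0, "")
    let cur := PySem.List.pyGetD seq i (0, "")
    if cur.1 - prev.1 > w then q
    else if prev.2 == "ENTRY" && cur.2 == "EXIT" then (q.1 + 1, q.2)
    else if prev.2 == "EXIT" && cur.2 == "ENTRY" then (q.1, q.2 + 1)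
    else q) q

-- B's flat pass, named
def pvScan (w : Int) (st : Option (String × Int × String) × Int × Int) :
    List (Int × String × String) → Option (String × Int × String) × Int × Int
  | [] => st
  | e :: t =>
      let q :=
        match st.1 with
        | some p =>
          if p.1 == e.2.1 then
            if e.1 - p.2.1 ≤ w then
              if p.2.2 == "ENTRY" && e.2.2 == "EXIT" then (st.2.1 + 1, st.2.2)
              else if p.2.2 == "EXIT" && e.2.2 == "ENTRY" then (st.2.1, st.2.2 + 1)
              else st.2
            else st.2
          else st.2
        | none => st.2
      pvScan w (some (e.2.1, e.1, e.2.2), q) t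


-- step adds constants
theorem pvStepP_add (w : Int) (q : Int × Int) (a b : Int × String) :
    pvStepP w q a b = (q.1 + (pvStepP w (0,0) a b).1, q.2 + (pvStepP w (0,0) a b).2) := by
  unfold pvStepP; split_ifs <;> simp

theorem pvCnt3_add (w : Int) (l : List (Int × String × String)) (q : Int × Int) :
    pvCnt3 w q l = (q.1 + (pvCnt3 w (0,0) l).1, q.2 + (pvCnt3 w (0,0) l).2) := by
  induction l generalizing q with
  | nil => simp [pvCnt3]
  | cons a t ih =>
    cases t with
    | nil => simp [pvCnt3]
    | cons b t' =>
      rw [show pvCnt3 w q (a :: b :: t') = pvCnt3 w (pvStepP w q (pvProj a) (pvProj b)) (b :: t') from rfl,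
          show pvCnt3 w (0,0) (a :: b :: t') = pvCnt3 w (pvStepP w (0,0) (pvProj a) (pvProj b)) (b :: t') from rfl,
          ih, ih (pvStepP w (0,0) (pvProj a) (pvProj b)), pvStepP_add w q]
      simp [add_assoc]

theorem pvCntP_map_proj (w : Int) (l : List (Int × String × String)) (q : Int × Int) :
    pvCntP w q (l.map pvProj) = pvCnt3 w q l := by
  induction l generalizing q with
  | nil => rfl
  | cons a t ih =>
    cases t with
    | nil => rfl
    | cons b t' => simpa [pvCntP, pvCnt3] using ih (q := pvStepP w q (pvProj a) (pvProj b))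

-- insertBy facts
theorem pv_insertBy_congr {α : Type} (b b' : α → α → Bool) (x : α) (l : List α)
    (h : ∀ y ∈ l, b x y = b' x y) : PySem.List.insertBy b x l = PySem.List.insertBy b' x l := by
  induction l with
  | nil => rfl
  | cons y ys ih =>
    simp only [PySem.List.insertBy, h y (by simp)]
    split
    · rfl
    · rw [ih (fun z hz => h z (by simp [hz]))]

theorem pv_insertBy_append_left {α : Type} (b : α → α → Bool) (x : α) (l1 l2 : List α)
    (h : ∀ y ∈ l1, b x y = false) :
    PySem.List.insertBy b x (l1 ++ l2) = l1 ++ PySem.List.insertBy b x l2 := by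
  induction l1 with
  | nil => rfl
  | cons y ys ih =>
    simp only [List.cons_append, PySem.List.insertBy, h y (by simp)]
    simp [ih (fun z hz => h z (by simp [hz]))]

theorem pv_insertBy_append_right {α : Type} (b : α → α → Bool) (x : α) (l1 l2 : List α)
    (h : ∀ y ∈ l2, b x y = true) :
    PySem.List.insertBy b x (l1 ++ l2) = PySem.List.insertBy b x l1 ++ l2 := by
  induction l1 with
  | nil =>
    cases l2 with
    | nil => rfl
    | cons y ys => simp [PySem.List.insertBy, h y (by simp)]
  | cons y ys ih =>
    simp only [List.cons_append, PySem.List.insertBy]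
    split
    · rfl
    · simp [ih]

theorem pv_map_insertBy {α β : Type} (b : α → α → Bool) (b' : β → β → Bool) (f : α → β)
    (x : α) (l : List α) (h : ∀ y, b x y = b' (f x) (f y)) :
    (PySem.List.insertBy b x l).map f = PySem.List.insertBy b' (f x) (l.map f) := by
  induction l with
  | nil => rfl
  | cons y ys ih =>
    simp only [PySem.List.insertBy, List.map_cons, h y]
    split
    · simp
    · simp [ih]

-- sorted of snoc = insert into sorted
theorem pv_sorted_snoc {α κ : Type} [LinearOrder κ] (l : List α) (x : α) (key : α → κ) :
    PySem.List.sorted (l ++ [x]) key =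
      PySem.List.insertBy (fun a b => decide (key a < key b)) x (PySem.List.sorted l key) := by
  rw [PySem.List.sorted_eq_foldl_insertBy, PySem.List.sorted_eq_foldl_insertBy, List.foldl_append]
  rfl

theorem pv_sorted2_eq_foldl (events : List (Int × String × String)) :
    PySem.List.sorted2 events (fun e => e.2.1) (fun e => e.1) =
      events.foldl (fun acc x => PySem.List.insertBy
        (fun a b => decide (a.2.1 < b.2.1) || (!decide (b.2.1 < a.2.1) && decide (a.1 < b.1))) x acc) [] := rfl

-- sorted commutes with the key-preserving projection
theorem pv_sorted_map_proj (l : List (Int × String × String)) :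
    PySem.List.sorted (l.map pvProj) (fun p => p.1) =
      (PySem.List.sorted l (fun e => e.1)).map pvProj := by
  rw [PySem.List.sorted_eq_foldl_insertBy, PySem.List.sorted_eq_foldl_insertBy, List.foldl_map]
  suffices h : ∀ acc : List (Int × String × String),
      l.foldl (fun acc x => PySem.List.insertBy (fun a b => decide (a.1 < b.1)) (pvProj x) acc) (acc.map pvProj)
        = (l.foldl (fun acc x => PySem.List.insertBy (fun a b => decide (a.1 < b.1)) x acc) acc).map pvProj by
    simpa using h []
  induction l with
  | nil => intro acc; rfl
  | cons a t ih =>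
    intro acc
    simp only [List.foldl_cons]
    rw [← pv_map_insertBy (fun a b => decide (a.1 < b.1)) (fun a b => decide (a.1 < b.1)) pvProj a acc (fun y => rfl)]
    exact ih _

-- symbols of a block
theorem pv_mem_block_sym (events : List (Int × String × String)) (s : String)
    (e : Int × String × String) (he : e ∈ PySem.List.sorted (pvG events s) (fun e => e.1)) :
    e.2.1 = s := by
  rw [PySem.List.mem_sorted] at he
  exact (by simpa [pvG, List.mem_filter] using he : e ∈ events ∧ e.2.1 = s).2

theorem pv_pvSK_pairwise (events : List (Int × String × String)) :
    (pvSK events).Pairwise (· < ·) := by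
  unfold pvSK pvKeysA
  exact PySem.List.sorted_ofList_pairwise_lt _

theorem pv_pvSK_nodup (events : List (Int × String × String)) : (pvSK events).Nodup :=
  (pv_pvSK_pairwise events).imp (fun h => ne_of_lt h)

theorem pv_pvSK_perm (events : List (Int × String × String)) :
    (pvSK events).Perm (pvKeysA events) := PySem.List.sorted_perm _ _ _

theorem pv_mem_pvSK (events : List (Int × String × String)) (s : String) :
    s ∈ pvSK events ↔ s ∈ events.map (fun e => e.2.1) := by
  rw [(pv_pvSK_perm events).mem_iff]
  exact PySem.Set.mem_ofList _ _

-- insert into a strictly sorted list splits it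
theorem pv_insertBy_sorted_split {α : Type} [LinearOrder α] (x : α) (K : List α)
    (hp : K.Pairwise (· < ·)) (hx : x ∉ K) :
    ∃ A1 A2, K = A1 ++ A2 ∧
      PySem.List.insertBy (fun a b => decide (a < b)) x K = A1 ++ x :: A2 ∧
      (∀ y ∈ A1, y < x) ∧ (∀ y ∈ A2, x < y) := by
  induction K with
  | nil => exact ⟨[], [], rfl, rfl, by simp, by simp⟩
  | cons y ys ih =>
    rw [List.pairwise_cons] at hp
    by_cases hxy : x < y
    · refine ⟨[], y :: ys, rfl, ?_, by simp, ?_⟩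
      · simp [PySem.List.insertBy, hxy]
      · intro z hz
        rcases List.mem_cons.mp hz with rfl | hz
        · exact hxy
        · exact hxy.trans (hp.1 z hz)
    · have hyx : y < x := by
        rcases lt_or_eq_of_le (not_lt.mp hxy) with h | h
        · exact h
        · exact absurd h.symm (by simp at hx; exact fun hh => hx.1 hh)
      obtain ⟨A1, A2, h1, h2, h3, h4⟩ := ih hp.2 (by simp at hx; exact fun hh => hx.2 hh)
      refine ⟨y :: A1, A2, by simp [h1], ?_, ?_, h4⟩
      · simp only [PySem.List.insertBy]
        rw [if_neg (by simp [hxy]), h2]; simp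
      · intro z hz
        rcases List.mem_cons.mp hz with rfl | hz
        · exact hyx
        · exact h3 z hz

-- the B-side comparator
theorem pv_lt_of_sym_lt (x y : Int × String × String) (h : y.2.1 < x.2.1) :
    (decide (x.2.1 < y.2.1) || (!decide (y.2.1 < x.2.1) && decide (x.1 < y.1))) = false := by
  simp [h, not_lt_of_gt h]

theorem pv_lt_of_sym_gt (x y : Int × String × String) (h : x.2.1 < y.2.1) :
    (decide (x.2.1 < y.2.1) || (!decide (y.2.1 < x.2.1) && decide (x.1 < y.1))) = true := by
  simp [h]

theorem pv_lt_of_sym_eq (x y : Int × String × String) (h : x.2.1 = y.2.1) :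
    (decide (x.2.1 < y.2.1) || (!decide (y.2.1 < x.2.1) && decide (x.1 < y.1))) = decide (x.1 < y.1) := by
  simp [h]

theorem pv_pvG_snoc_self (es : List (Int × String × String)) (x : Int × String × String) :
    pvG (es ++ [x]) x.2.1 = pvG es x.2.1 ++ [x] := by
  simp [pvG, List.filter_append]

theorem pv_pvG_snoc_ne (es : List (Int × String × String)) (x : Int × String × String)
    (s : String) (h : s ≠ x.2.1) : pvG (es ++ [x]) s = pvG es s := by
  simp [pvG, List.filter_append, h.symm, beq_iff_eq]

-- the sort decomposition: the global stable (symbol, idx) sort is the blocks of per-symbol idx-sorts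
theorem pv_sort_decomp (events : List (Int × String × String)) :
    PySem.List.sorted2 events (fun e => e.2.1) (fun e => e.1) = pvBlocks events := by
  induction events using List.reverseRecOn with
  | nil => rfl
  | append_singleton es x ih =>
    have hsnoc : PySem.List.sorted2 (es ++ [x]) (fun e => e.2.1) (fun e => e.1) =
        PySem.List.insertBy
          (fun a b => decide (a.2.1 < b.2.1) || (!decide (b.2.1 < a.2.1) && decide (a.1 < b.1))) x
          (PySem.List.sorted2 es (fun e => e.2.1) (fun e => e.1)) := by
      rw [pv_sorted2_eq_foldl, pv_sorted2_eq_foldl, List.foldl_append]; rfl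
    rw [hsnoc, ih]
    by_cases hmem : x.2.1 ∈ es.map (fun e => e.2.1)
    · -- symbol already present: SK unchanged, x goes into its own block
      have hSK : pvSK (es ++ [x]) = pvSK es := by
        unfold pvSK pvKeysA
        rw [List.map_append, List.map_singleton, PySem.Set.ofList_append_singleton,
            PySem.Set.add_of_mem ((PySem.Set.mem_ofList _ _).mpr hmem)]
      have hs0 : x.2.1 ∈ pvSK es := (pv_mem_pvSK es x.2.1).mpr hmem
      obtain ⟨A1, A2, hK⟩ := List.append_of_mem hs0
      have hpw := pv_pvSK_pairwise es
      rw [hK, List.pairwise_append] at hpw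
      have hA1lt : ∀ s ∈ A1, s < x.2.1 := fun s hs => hpw.2.2 s hs x.2.1 (by simp)
      have hA2gt : ∀ s ∈ A2, x.2.1 < s := fun s hs => (List.pairwise_cons.mp hpw.2.1).1 s hs
      unfold pvBlocks
      rw [hSK, hK, List.flatMap_append, List.flatMap_cons, List.flatMap_append, List.flatMap_cons]
      rw [pv_insertBy_append_left _ _ _ _ (by
        intro y hy
        obtain ⟨s, hs, hy⟩ := List.mem_flatMap.mp hy
        exact pv_lt_of_sym_lt x y (by rw [pv_mem_block_sym es s y hy]; exact hA1lt s hs))]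
      rw [pv_insertBy_append_right _ _ _ (A2.flatMap fun s => PySem.List.sorted (pvG es s) (fun e => e.1)) (by
        intro y hy
        obtain ⟨s, hs, hy⟩ := List.mem_flatMap.mp hy
        exact pv_lt_of_sym_gt x y (by rw [pv_mem_block_sym es s y hy]; exact hA2gt s hs))]
      rw [pv_insertBy_congr _ (fun a b => decide (a.1 < b.1)) x _ (by
        intro y hy
        exact pv_lt_of_sym_eq x y (pv_mem_block_sym es x.2.1 y hy).symm)]
      have e1 : (A1.flatMap fun s => PySem.List.sorted (pvG (es ++ [x]) s) (fun e => e.1))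
          = A1.flatMap fun s => PySem.List.sorted (pvG es s) (fun e => e.1) :=
        List.flatMap_congr (fun s hs => by rw [pv_pvG_snoc_ne es x s (ne_of_lt (hA1lt s hs))])
      have e2 : (A2.flatMap fun s => PySem.List.sorted (pvG (es ++ [x]) s) (fun e => e.1))
          = A2.flatMap fun s => PySem.List.sorted (pvG es s) (fun e => e.1) :=
        List.flatMap_congr (fun s hs => by rw [pv_pvG_snoc_ne es x s (ne_of_gt (hA2gt s hs))])
      have e3 : PySem.List.sorted (pvG (es ++ [x]) x.2.1) (fun e => e.1)
          = PySem.List.insertBy (fun a b => decide (a.1 < b.1)) x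
              (PySem.List.sorted (pvG es x.2.1) (fun e => e.1)) := by
        rw [pv_pvG_snoc_self, pv_sorted_snoc]
      rw [e1, e2, e3]
    · -- fresh symbol: its block is the singleton [x], inserted between the blocks
      have hGnil : pvG es x.2.1 = [] := by
        refine List.filter_eq_nil_iff.mpr (fun e he => ?_)
        simp only [beq_iff_eq]
        intro hh
        exact hmem (List.mem_map.mpr ⟨e, he, hh⟩)
      have hSK : pvSK (es ++ [x]) =
          PySem.List.insertBy (fun a b => decide (a < b)) x.2.1 (pvSK es) := by
        unfold pvSK pvKeysA
        rw [List.map_append, List.map_singleton, PySem.Set.ofList_append_singleton,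
            PySem.Set.add_of_not_mem (fun h => hmem ((PySem.Set.mem_ofList _ _).mp h)),
            pv_sorted_snoc]
      have hxK : x.2.1 ∉ pvSK es := fun h => hmem ((pv_mem_pvSK es x.2.1).mp h)
      obtain ⟨A1, A2, hsplit, hins, hA1lt, hA2gt⟩ :=
        pv_insertBy_sorted_split x.2.1 (pvSK es) (pv_pvSK_pairwise es) hxK
      unfold pvBlocks
      rw [hSK, hins, hsplit, List.flatMap_append, List.flatMap_append, List.flatMap_cons]
      rw [pv_insertBy_append_left _ _ _ _ (by
        intro y hy
        obtain ⟨s, hs, hy⟩ := List.mem_flatMap.mp hy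
        exact pv_lt_of_sym_lt x y (by rw [pv_mem_block_sym es s y hy]; exact hA1lt s hs))]
      rw [show (A2.flatMap fun s => PySem.List.sorted (pvG es s) (fun e => e.1))
            = [] ++ (A2.flatMap fun s => PySem.List.sorted (pvG es s) (fun e => e.1)) from rfl]
      rw [pv_insertBy_append_right _ _ [] _ (by
        intro y hy
        obtain ⟨s, hs, hy⟩ := List.mem_flatMap.mp hy
        exact pv_lt_of_sym_gt x y (by rw [pv_mem_block_sym es s y hy]; exact hA2gt s hs))]
      have e1 : (A1.flatMap fun s => PySem.List.sorted (pvG (es ++ [x]) s) (fun e => e.1))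
          = A1.flatMap fun s => PySem.List.sorted (pvG es s) (fun e => e.1) :=
        List.flatMap_congr (fun s hs => by rw [pv_pvG_snoc_ne es x s (ne_of_lt (hA1lt s hs))])
      have e2 : (A2.flatMap fun s => PySem.List.sorted (pvG (es ++ [x]) s) (fun e => e.1))
          = A2.flatMap fun s => PySem.List.sorted (pvG es s) (fun e => e.1) :=
        List.flatMap_congr (fun s hs => by rw [pv_pvG_snoc_ne es x s (ne_of_gt (hA2gt s hs))])
      have e3 : PySem.List.sorted (pvG (es ++ [x]) x.2.1) (fun e => e.1) = [x] := by
        rw [pv_pvG_snoc_self, hGnil]; rfl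
      rw [e1, e2, e3]
      simp [PySem.List.insertBy]

theorem pv_pyGetD_cons_of_one_le {α : Type} (x : α) (xs : List α) (i : Int) (h : 1 ≤ i) (d : α) :
    PySem.List.pyGetD (x :: xs) i d = PySem.List.pyGetD xs (i - 1) d := by
  obtain ⟨n, rfl⟩ : ∃ n : Nat, i = ((n + 1 : Nat) : Int) :=
    ⟨(i - 1).toNat, by omega⟩
  rw [PySem.List.pyGetD_natCast, show ((n + 1 : Nat) : Int) - 1 = ((n : Nat) : Int) from by omega,
      PySem.List.pyGetD_natCast]
  rfl

theorem pv_pyRange_succ_map (a b : Int) :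
    PySem.List.pyRange (a + 1) (b + 1) 1 = (PySem.List.pyRange a b 1).map (· + 1) := by
  rw [PySem.List.pyRange_one, PySem.List.pyRange_one]
  have : b + 1 - (a + 1) = b - a := by ring
  rw [this, List.map_map]
  exact List.map_congr_left (fun k hk => by simp; ring)

-- A's inner index loop is the structural adjacent-pair count
theorem pv_pvInner_eq_pvCntP (w : Int) (seq : List (Int × String)) (q : Int × Int) :
    pvInner w q seq = pvCntP w q seq := by
  induction seq generalizing q with
  | nil => simp [pvInner, pvCntP, PySem.List.pyRange_one_eq_nil]
  | cons a t ih =>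
    cases t with
    | nil =>
      simp [pvInner, pvCntP, PySem.List.pyRange_one_eq_nil le_rfl]
    | cons b t' =>
      unfold pvInner
      have hlen : PySem.List.len (a :: b :: t') = ((t'.length + 2 : Nat) : Int) := by
        simp [PySem.List.len_eq]; omega
      rw [hlen, PySem.List.pyRange_one_cons (by omega)]
      rw [List.foldl_cons]
      have h1 : PySem.List.pyGetD (a :: b :: t') ((1 : Int) - 1) (0, "") = a := by
        norm_num [PySem.List.pyGetD_zero_cons]
      have h2 : PySem.List.pyGetD (a :: b :: t') (1 : Int) (0, "") = b := by
        rw [PySem.List.pyGetD_ofNat']; rfl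
      rw [show ((t'.length + 2 : Nat) : Int) = ((t'.length + 1 : Nat) : Int) + 1 from by omega]
      rw [pv_pyRange_succ_map 1 ((t'.length + 1 : Nat) : Int), List.foldl_map]
      rw [PySem.List.foldl_congr_mem _ _ (fun q i =>
        let prev := PySem.List.pyGetD (b :: t') (i - 1) (0, "")
        let cur := PySem.List.pyGetD (b :: t') i (0, "")
        if cur.1 - prev.1 > w then q
        else if prev.2 == "ENTRY" && cur.2 == "EXIT" then (q.1 + 1, q.2)
        else if prev.2 == "EXIT" && cur.2 == "ENTRY" then (q.1, q.2 + 1)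
        else q) _ ?_]
      · have := ih (q := if b.1 - a.1 > w then q
          else if a.2 == "ENTRY" && b.2 == "EXIT" then (q.1 + 1, q.2)
          else if a.2 == "EXIT" && b.2 == "ENTRY" then (q.1, q.2 + 1)
          else q)
        unfold pvInner at this
        rw [show PySem.List.len (b :: t') = ((t'.length + 1 : Nat) : Int) from by
              simp [PySem.List.len_eq]] at this
        rw [h1, h2]
        simpa [pvCntP, pvStepP] using this
      · intro acc i hi
        rw [PySem.List.mem_pyRange_one] at hi
        have e1 : PySem.List.pyGetD (a :: b :: t') (i + 1 - 1) (0, "")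
            = PySem.List.pyGetD (b :: t') (i - 1) (0, "") := by
          rw [show i + 1 - 1 = i from by ring, pv_pyGetD_cons_of_one_le _ _ _ (by omega)]
        have e2 : PySem.List.pyGetD (a :: b :: t') (i + 1) (0, "")
            = PySem.List.pyGetD (b :: t') i (0, "") := by
          rw [pv_pyGetD_cons_of_one_le _ _ _ (by omega), show i + 1 - 1 = i from by ring]
        simp only [e1, e2]

-- A's grouping dict: values are the per-symbol projected event lists, keyed in first-occurrence order
theorem pv_values_eq (events : List (Int × String × String)) :
    (events.foldl (fun d e => d.modify e.2.1 [] (fun l => l ++ [(e.1, e.2.2)])) PySem.Dict.empty).values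
      = (pvKeysA events).map (fun s => (pvG events s).map pvProj) := by
  have hfold : events.foldl (fun d e => d.modify e.2.1 [] (fun l => l ++ [(e.1, e.2.2)])) PySem.Dict.empty
      = (events.map (fun e => (e.2.1, (e.1, e.2.2)))).foldl
          (fun d p => d.modify p.1 [] (fun l => l ++ [p.2])) PySem.Dict.empty := by
    rw [List.foldl_map]
  have hkeys : (events.foldl (fun d e => d.modify e.2.1 [] (fun l => l ++ [(e.1, e.2.2)])) PySem.Dict.empty).keys
      = pvKeysA events := by
    rw [PySem.Dict.keys_foldl_modify_key events (fun e => e.2.1) [] (fun _ e => fun l => l ++ [(e.1, e.2.2)])]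
    simp [PySem.Dict.keys_empty, PySem.Set.update_nil_left, pvKeysA]
  have hnd : (events.foldl (fun d e => d.modify e.2.1 [] (fun l => l ++ [(e.1, e.2.2)])) PySem.Dict.empty).keys.Nodup := by
    exact PySem.Dict.nodup_keys_foldl_modify_key events (fun e => e.2.1) [] _ _ (by simp [PySem.Dict.keys_empty])
  rw [PySem.Dict.values_eq_map_keys _ hnd [], hkeys]
  refine List.map_congr_left (fun s _ => ?_)
  rw [hfold, PySem.Dict.getD_foldl_modify_append, PySem.Dict.getD_empty]
  rw [List.filter_map, List.map_map]
  simp only [List.nil_append]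
  rfl

-- B's flat pass as a named recursion over the fold
theorem pv_foldl_eq_pvScan (w : Int) (l : List (Int × String × String))
    (st : Option (String × Int × String) × Int × Int) :
    l.foldl
      (fun st e =>
        let q :=
          match st.1 with
          | some p =>
            if p.1 == e.2.1 then
              if e.1 - p.2.1 ≤ w then
                if p.2.2 == "ENTRY" && e.2.2 == "EXIT" then (st.2.1 + 1, st.2.2)
                else if p.2.2 == "EXIT" && e.2.2 == "ENTRY" then (st.2.1, st.2.2 + 1)
                else st.2
              else st.2
            else st.2
          | none => st.2
        (some (e.2.1, e.1, e.2.2), q)) st = pvScan w st l := by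
  induction l generalizing st with
  | nil => rfl
  | cons e t ih => rw [List.foldl_cons, ih]; rfl

def pvLastT (p : Int × String × String) (l : List (Int × String × String)) : Int × String × String :=
  l.foldl (fun _ e => e) p

theorem pv_pvLastT_sym (s : String) (l : List (Int × String × String))
    (hl : ∀ e ∈ l, e.2.1 = s) (p : Int × String × String) (hp : p.2.1 = s) :
    (pvLastT p l).2.1 = s := by
  induction l generalizing p with
  | nil => exact hp
  | cons e t ih => exact ih (fun z hz => hl z (by simp [hz])) e (hl e (by simp))

theorem pv_scan_same (w : Int) (s : String) (l : List (Int × String × String))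
    (hl : ∀ e ∈ l, e.2.1 = s) (p : Int × String × String) (hp : p.2.1 = s) (q : Int × Int) :
    pvScan w (some (p.2.1, p.1, p.2.2), q) l
      = (some ((pvLastT p l).2.1, (pvLastT p l).1, (pvLastT p l).2.2), pvCnt3 w q (p :: l)) := by
  induction l generalizing p q with
  | nil => rfl
  | cons e t ih =>
    have hbe : (p.2.1 == e.2.1) = true := by rw [hp, hl e (by simp)]; simp
    have hq : (if p.2.1 == e.2.1 then
          if e.1 - p.1 ≤ w then
            if p.2.2 == "ENTRY" && e.2.2 == "EXIT" then (q.1 + 1, q.2)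
            else if p.2.2 == "EXIT" && e.2.2 == "ENTRY" then (q.1, q.2 + 1)
            else q
          else q
        else q) = pvStepP w q (pvProj p) (pvProj e) := by
      rw [if_pos hbe]
      unfold pvStepP pvProj
      by_cases hwin : e.1 - p.1 > w
      · rw [if_neg (show ¬(e.1 - p.1 ≤ w) by omega),
            if_pos (show (e.1, e.2.2).1 - (p.1, p.2.2).1 > w by simpa using hwin)]
      · rw [if_pos (show e.1 - p.1 ≤ w by omega),
            if_neg (show ¬((e.1, e.2.2).1 - (p.1, p.2.2).1 > w) by simpa using hwin)]
    have hstep : pvScan w (some (p.2.1, p.1, p.2.2), q) (e :: t)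
        = pvScan w (some (e.2.1, e.1, e.2.2), pvStepP w q (pvProj p) (pvProj e)) t := by
      rw [← hq]; rfl
    rw [hstep, ih (fun z hz => hl z (by simp [hz])) e (hl e (by simp))]
    rfl

theorem pv_pvScan_append (w : Int) (l1 l2 : List (Int × String × String))
    (st : Option (String × Int × String) × Int × Int) :
    pvScan w st (l1 ++ l2) = pvScan w (pvScan w st l1) l2 := by
  induction l1 generalizing st with
  | nil => rfl
  | cons e t ih => simp only [List.cons_append, pvScan]; exact ih _

theorem pv_scan_blocks (w : Int) (B : String → List (Int × String × String))
    (ks : List String) (hnd : ks.Nodup) (hB : ∀ s ∈ ks, ∀ e ∈ B s, e.2.1 = s) :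
    ∀ (st : Option (String × Int × String) × Int × Int),
      (∀ pr, st.1 = some pr → pr.1 ∉ ks) →
      (pvScan w st (ks.flatMap B)).2
        = (st.2.1 + (ks.map (fun s => (pvCnt3 w (0, 0) (B s)).1)).sum,
           st.2.2 + (ks.map (fun s => (pvCnt3 w (0, 0) (B s)).2)).sum) := by
  induction ks with
  | nil => intro st _; show st.2 = _; simp
  | cons s ks' ih =>
    intro st hst
    rw [List.flatMap_cons, pv_pvScan_append]
    have hnd' := (List.nodup_cons.mp hnd).2
    have hsks' := (List.nodup_cons.mp hnd).1
    have hB' : ∀ z ∈ ks', ∀ e ∈ B z, e.2.1 = z := fun z hz => hB z (by simp [hz])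
    cases hBs : B s with
    | nil =>
      rw [show pvScan w st [] = st from rfl,
          ih hnd' hB' st (fun pr hpr => fun hin => hst pr hpr (by simp [hin]))]
      simp [hBs, pvCnt3]
    | cons e rest =>
      have hsym : ∀ z ∈ B s, z.2.1 = s := hB s (by simp)
      have hes : e.2.1 = s := hsym e (by simp [hBs])
      have hstep : pvScan w st (e :: rest) = pvScan w (some (e.2.1, e.1, e.2.2), st.2) rest := by
        cases hpr : st.1 with
        | none => show pvScan w (some (e.2.1, e.1, e.2.2), _) rest = _; rw [hpr]
        | some pr =>
          have : (pr.1 == e.2.1) = false := by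
            have := hst pr hpr
            simp only [beq_eq_false_iff_ne, ne_eq]
            intro hh; exact this (by rw [hh, hes]; simp)
          show pvScan w (some (e.2.1, e.1, e.2.2), _) rest = _
          rw [hpr]
          simp only [this]
          rfl
      rw [hstep, show (some (e.2.1, e.1, e.2.2) : Option (String × Int × String)) = some ((e.2.1, e.1, e.2.2) : String × Int × String) from rfl]
      have := pv_scan_same w s rest (fun z hz => hsym z (by simp [hBs, hz])) e hes st.2
      rw [this]
      have hlast : (pvLastT e rest).2.1 = s :=
        pv_pvLastT_sym s rest (fun z hz => hsym z (by simp [hBs, hz])) e hes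
      rw [ih hnd' hB' _ (fun pr hpr hin => by
        simp only [Option.some.injEq] at hpr
        have : pr.1 = s := by rw [← hpr]; exact hlast
        exact hsks' (this ▸ hin))]
      rw [pvCnt3_add w (e :: rest) st.2]
      simp [hBs, add_assoc]

theorem pv_main (events : List (Int × String × String)) (window : Int) :
    whipsaw_counts_py events window = whipsaw_counts_py_alt events window := by
  have hA : whipsaw_counts_py events window =
      (fun q : Int × Int => [("quick_entry_exit", q.1), ("quick_exit_reentry", q.2),
        ("total_whipsaw", q.1 + q.2)])
       ((events.foldl (fun d e => d.modify e.2.1 [] (fun l => l ++ [(e.1, e.2.2)]))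
          PySem.Dict.empty).values.foldl
          (fun q seq0 => pvInner window q (PySem.List.sorted seq0 (fun x => x.1))) (0, 0)) := rfl
  have hB : whipsaw_counts_py_alt events window =
      (fun q : Int × Int => [("quick_entry_exit", q.1), ("quick_exit_reentry", q.2),
        ("total_whipsaw", q.1 + q.2)])
       ((pvScan window (none, 0, 0)
          (PySem.List.sorted2 events (fun e => e.2.1) (fun e => e.1))).2) := by
    rw [← pv_foldl_eq_pvScan]
    rfl
  rw [hA, hB, pv_sort_decomp, pv_values_eq, List.foldl_map]
  rw [PySem.List.foldl_congr_mem _ _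
      (fun (q : Int × Int) s => (q.1 + (pvC events window s).1, q.2 + (pvC events window s).2)) _
      (fun q s _ => by
        rw [pv_pvInner_eq_pvCntP, pv_sorted_map_proj, pvCntP_map_proj, pvCnt3_add]
        rfl)]
  rw [PySem.List.foldl_prod_mk (fun a s => a + (pvC events window s).1)
        (fun a s => a + (pvC events window s).2) (pvKeysA events) 0 0]
  rw [PySem.List.foldl_add, PySem.List.foldl_add]
  rw [show pvBlocks events =
      (pvSK events).flatMap (fun s => PySem.List.sorted (pvG events s) (fun e => e.1)) from rfl]
  rw [pv_scan_blocks window _ (pvSK events) (pv_pvSK_nodup events)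
      (fun s hs e he => pv_mem_block_sym events s e he) (none, 0, 0)
      (fun pr hpr => by simp at hpr)]
  have h1 := ((pv_pvSK_perm events).map (fun s => (pvC events window s).1)).sum_eq
  have h2 := ((pv_pvSK_perm events).map (fun s => (pvC events window s).2)).sum_eq
  simp only [pvC] at h1 h2 ⊢
  rw [h1, h2]

-- ===== VERDICT (by name: the statement is the Claim_ definition above) =====
theorem whipsaw_counts_py_spec : Claim_equal_whipsaw_counts_py := by
  intro events window _
  show whipsaw_counts_py events window = whipsaw_counts_py_alt events window
  exact pv_main events window
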